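-- pv_equiv track=rewrite | github.com/spiderqi/lqlabel | text2/double-censored.py | stepk3
-- ===== SOURCE A (Python) =====
-- def stepk3(lc,d,p):
--     x=[]
--     for i in range(len(d)):
--         sumc=0
--         for j in range(i,len(d)):
--             sumc+=p[j][i]*lc[j]
--         x.append(sumc)
--     return d+x
-- ===== SOURCE B (Python) =====
-- def stepk3(lc, d, p):
--     # Suffix-sum recurrence: u[i] = sum of p[j'][i]*lc[j'] for j' >= j after step j.
--     # Rows are processed from last to first with a shrinking vector u; at step j
--     # the value x[j] = u[j] is final, so the output is built back-to-front.
--     n = len(d)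
--     u = [0] * n
--     x = []
--     for j in range(n - 1, -1, -1):
--         u = [p[j][i] * lc[j] + u[i] for i in range(j + 1)]
--         x.append(u[j])
--     x.reverse()
--     return d + x
-- ===== Notes on version B (the rewrite author's own statement) =====
-- stated objective: alternative
-- what changed: A gathers each output x[i] to completion as a scalar column sum over j in [i,n); B instead runs a suffix-sum recurrence over rows from last to first, maintaining one shrinking vector u with u[i]=sum_{j'>=j} p[j'][i]*lc[j'], finalizing x[j]=u[j] at each step and building the output back-to-front.
import Mathlib
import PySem

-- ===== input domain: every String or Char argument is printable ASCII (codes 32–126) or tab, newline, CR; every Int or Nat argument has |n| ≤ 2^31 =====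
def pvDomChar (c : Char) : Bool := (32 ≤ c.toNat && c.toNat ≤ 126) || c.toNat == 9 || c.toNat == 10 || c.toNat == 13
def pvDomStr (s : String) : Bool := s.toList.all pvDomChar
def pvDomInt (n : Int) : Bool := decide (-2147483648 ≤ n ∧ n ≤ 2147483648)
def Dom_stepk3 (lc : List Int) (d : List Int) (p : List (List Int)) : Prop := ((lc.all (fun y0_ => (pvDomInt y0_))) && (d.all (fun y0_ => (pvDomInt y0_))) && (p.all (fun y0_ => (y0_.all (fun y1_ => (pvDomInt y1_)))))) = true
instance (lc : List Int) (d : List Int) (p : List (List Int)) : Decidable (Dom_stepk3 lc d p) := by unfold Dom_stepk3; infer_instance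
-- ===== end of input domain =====

-- B replaces A's per-column scalar gather with a suffix-sum recurrence over rows
-- processed last-to-first, keeping one shrinking vector and emitting the output
-- back-to-front; same O(n^2) cost, different algorithmic decomposition.

-- ===== PORT A =====
-- for i in range(len(d)): sumc = Σ_{j=i..n-1} p[j][i]*lc[j]; x.append(sumc); return d+x
def stepk3 (lc : List Int) (d : List Int) (p : List (List Int)) : List Int :=
  let n := d.length
  let x := (List.range n).foldl
    (fun x i =>
      let sumc := (List.range' i (n - i)).foldl
        (fun sumc j => sumc + ((p.getD j []).getD i 0) * lc.getD j 0) 0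
      x ++ [sumc]) []
  d ++ x

-- ===== PORT B =====
-- u = [0]*n; for j in range(n-1,-1,-1): u = [p[j][i]*lc[j] + u[i] for i in range(j+1)];
-- x.append(u[j]); x.reverse(); return d + x
def stepk3_alt (lc : List Int) (d : List Int) (p : List (List Int)) : List Int :=
  let n := d.length
  let st := (List.range n).reverse.foldl
    (fun (st : List Int × List Int) j =>
      let u := (List.range (j + 1)).map
        (fun i => ((p.getD j []).getD i 0) * lc.getD j 0 + st.1.getD i 0)
      (u, st.2 ++ [u.getD j 0]))
    (List.replicate n 0, [])
  d ++ st.2.reverse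

-- ===== PRECONDITION & SPEC =====
-- exactly the inputs on which the Python A returns: lc and p reach index n-1 and
-- row j of p reaches index j (otherwise A raises IndexError; B raises there too)
def Pre_stepk3 (lc : List Int) (d : List Int) (p : List (List Int)) : Prop :=
  d.length ≤ lc.length ∧ d.length ≤ p.length ∧
    ∀ j, j < d.length → j < (p.getD j []).length
instance (lc : List Int) (d : List Int) (p : List (List Int)) : Decidable (Pre_stepk3 lc d p) := by unfold Pre_stepk3; infer_instance
def pvWitness_stepk3 : List Int × List Int × List (List Int) :=
  ([2, -1, 3], [1, 2, 3], [[4], [5, 6], [7, 8, 9]])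
def Spec_stepk3 (lc : List Int) (d : List Int) (p : List (List Int)) (out : List Int) : Prop := out = stepk3_alt lc d p
instance (lc : List Int) (d : List Int) (p : List (List Int)) (out : List Int) : Decidable (Spec_stepk3 lc d p out) := by unfold Spec_stepk3; infer_instance

-- ===== CLAIM (what is proved, stated in full; the proofs are below) =====
def Claim_equal_stepk3 : Prop := ∀ (lc : List Int) (d : List Int) (p : List (List Int)), Dom_stepk3 lc d p → Pre_stepk3 lc d p → Spec_stepk3 lc d p (stepk3 lc d p)

-- ===== LEMMAS AND PROOFS =====

-- the column suffix sum Σ_{j'=j..n-1} p[j'][i]*lc[j']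
def colS (lc : List Int) (p : List (List Int)) (n i j : Nat) : Int :=
  ((List.range' j (n - j)).map (fun j' => ((p.getD j' []).getD i 0) * lc.getD j' 0)).sum

-- A's outer loop: appending f i for each i of l is mapping
theorem foldl_append_map {α : Type} (f : Nat → α) :
    ∀ (l : List Nat) (acc : List α),
      l.foldl (fun x i => x ++ [f i]) acc = acc ++ l.map f := by
  intro l
  induction l with
  | nil => simp
  | cons a t ih => intro acc; simp [List.foldl_cons, ih]

-- A's inner loop: accumulated sum
theorem foldl_add_sum (g : Nat → Int) :
    ∀ (l : List Nat) (s : Int),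
      l.foldl (fun s j => s + g j) s = s + (l.map g).sum := by
  intro l
  induction l with
  | nil => simp
  | cons a t ih => intro s; simp [List.foldl_cons, ih]; ring

-- getD of a map over range
theorem mapRange_getD (m i : Nat) (g : Nat → Int) :
    ((List.range m).map g).getD i 0 = if i < m then g i else 0 := by
  by_cases h : i < m <;>
    simp [List.getD_eq_getElem?_getD, h]

-- one step of the suffix recurrence: colS i j = F i j + colS i (j+1) for j < n
theorem colS_step (lc : List Int) (p : List (List Int)) (n i j : Nat) (hj : j < n) :
    colS lc p n i j = ((p.getD j []).getD i 0) * lc.getD j 0 + colS lc p n i (j + 1) := by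
  unfold colS
  have h1 : n - j = (n - (j + 1)) + 1 := by omega
  rw [h1, List.range'_succ]
  simp

-- B's loop invariant: folding rows j-1, …, 0 from a vector holding the
-- suffix sums at level j appends the finalized column sums in descending order
theorem bfold (lc : List Int) (p : List (List Int)) (n : Nat) :
    ∀ (j : Nat), j ≤ n → ∀ (u xs : List Int),
      (∀ i, i < j → u.getD i 0 = colS lc p n i j) →
      ((List.range j).reverse.foldl
        (fun (st : List Int × List Int) j =>
          let u := (List.range (j + 1)).map
            (fun i => ((p.getD j []).getD i 0) * lc.getD j 0 + st.1.getD i 0)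
          (u, st.2 ++ [u.getD j 0])) (u, xs)).2
      = xs ++ (List.range j).reverse.map (fun k => colS lc p n k k) := by
  intro j
  induction j with
  | zero => intro _ u xs _; simp
  | succ k ih =>
    intro hk u xs hu
    rw [List.range_succ, List.reverse_append]
    simp only [List.reverse_singleton, List.singleton_append, List.foldl_cons, List.map_cons]
    set u' := (List.range (k + 1)).map
      (fun i => ((p.getD k []).getD i 0) * lc.getD k 0 + u.getD i 0) with hu'
    have hval : ∀ i, i ≤ k → u'.getD i 0 = colS lc p n i k := by
      intro i hi
      rw [hu', mapRange_getD]
      have hik : i < k + 1 := by omega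
      rw [if_pos hik, hu i hik, ← colS_step lc p n i k (by omega)]
    have ih' := ih (by omega) u' (xs ++ [u'.getD k 0])
      (fun i hik => hval i (by omega))
    rw [ih', hval k (le_refl k), List.append_assoc]
    simp

-- ===== VERDICT (by name: the statement is the Claim_ definition above) =====
theorem stepk3_spec : Claim_equal_stepk3 := by
  intro lc d p _ _
  show stepk3 lc d p = stepk3_alt lc d p
  show d ++ (List.range d.length).foldl
      (fun x i => x ++ [(List.range' i (d.length - i)).foldl
        (fun sumc j => sumc + ((p.getD j []).getD i 0) * lc.getD j 0) 0]) []
    = d ++ ((List.range d.length).reverse.foldl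
        (fun (st : List Int × List Int) j =>
          let u := (List.range (j + 1)).map
            (fun i => ((p.getD j []).getD i 0) * lc.getD j 0 + st.1.getD i 0)
          (u, st.2 ++ [u.getD j 0])) (List.replicate d.length 0, [])).2.reverse
  set n := d.length with hn
  congr 1
  -- A's side is the map of column sums
  rw [foldl_append_map]
  simp only [List.nil_append]
  have hA : ∀ i, (List.range' i (n - i)).foldl
      (fun sumc j => sumc + ((p.getD j []).getD i 0) * lc.getD j 0) 0 = colS lc p n i i := by
    intro i
    rw [foldl_add_sum]
    simp [colS]
  -- B's side via the invariant
  have hB := bfold lc p n n (le_refl n) (List.replicate n 0) []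
    (by intro i _; simp [colS])
  rw [hB]
  simp only [List.nil_append, List.map_reverse, List.reverse_reverse]
  exact List.map_congr_left (fun i _ => hA i)
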